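-- pv_equiv track=rewrite | github.com/sam-hudson02/proj281 | src/utils/nasa_data.py | get_midpoint
-- ===== SOURCE A (Python) =====
-- def get_midpoint(data_lines: list[str]) -> int:
--     """
--     Args:
--         data_lines (list[str]): The lines of data from the NASA API
--     returns:
--         mid_point (int): The index of the midpoint of the data
--
--     Attempts to find the midpoint of nasa planet data, which
--     can be used to split the data into two parts, each of which
--     contains a key and a value.
--     """
--     first_data_line = data_lines[0]
--     first_data_line = first_data_line.split('=')
--     hit_val = False
--     hit_whitespace = False
--     mid_point = 0
--     for i, c in enumerate(first_data_line[1]):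
--         if not hit_val:
--             if c != ' ':
--                 hit_val = True
--         elif not hit_whitespace:
--             if c == ' ':
--                 hit_whitespace = True
--         else:
--             if c != ' ':
--                 mid_point = i - 1
--                 break
--     # add back the length of the first part of the line
--     mid_point += len(first_data_line[0])
--     return mid_point
-- ===== SOURCE B (Python) =====
-- def get_midpoint(data_lines: list[str]) -> int:
--     parts = data_lines[0].split('=')
--     s = parts[1]
--     after_token = s.lstrip(' ')
--     mid = 0
--     sp = after_token.find(' ')
--     if sp != -1:
--         tail = after_token[sp:].lstrip(' ')
--         if tail:
--             mid = len(s) - len(tail) - 1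
--     return mid + len(parts[0])
-- ===== Notes on version B (the rewrite author's own statement) =====
-- stated objective: idiomatic
-- what changed: Replaced A's three-flag character-by-character state machine with straight-line string primitives: lstrip(' ') to skip leading spaces, find(' ') to locate the gap after the first token, and a slice+lstrip to find the next token, computing the midpoint by length arithmetic.
import Mathlib
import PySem

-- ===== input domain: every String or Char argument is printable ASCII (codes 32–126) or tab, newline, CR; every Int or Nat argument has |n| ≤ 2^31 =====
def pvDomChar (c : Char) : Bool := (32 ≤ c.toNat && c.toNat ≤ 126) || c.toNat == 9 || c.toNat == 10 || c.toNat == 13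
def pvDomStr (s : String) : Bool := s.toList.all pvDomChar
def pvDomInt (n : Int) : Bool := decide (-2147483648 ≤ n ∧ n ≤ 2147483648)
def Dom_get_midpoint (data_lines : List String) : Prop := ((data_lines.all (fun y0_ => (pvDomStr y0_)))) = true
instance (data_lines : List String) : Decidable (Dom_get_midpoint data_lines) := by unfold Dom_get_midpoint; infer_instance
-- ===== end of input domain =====

-- B replaces A's three-flag character state machine with str primitives (lstrip/find/slice): idiomatic, no explicit loop.

-- ===== PORT A =====
-- the for-loop over enumerate(first_data_line[1]): pattern on (hit_val, hit_whitespace)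
-- mirrors "if not hit_val / elif not hit_whitespace / else"; mid_point stays 0 unless
-- the break fires, where it becomes i - 1
def pvLoopA : List Char → Int → Bool → Bool → Int
  | [], _, _, _ => 0
  | c :: rest, i, false, hitWs =>
      if c ≠ ' ' then pvLoopA rest (i + 1) true hitWs else pvLoopA rest (i + 1) false hitWs
  | c :: rest, i, true, false =>
      if c = ' ' then pvLoopA rest (i + 1) true true else pvLoopA rest (i + 1) true false
  | c :: rest, i, true, true =>
      if c ≠ ' ' then i - 1 else pvLoopA rest (i + 1) true true

def get_midpoint (data_lines : List String) : Int :=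
  let first := ((PySem.List.pyGet? data_lines 0).getD "").toList  -- data_lines[0]; the default is unreachable under Pre_
  let parts := PySem.Chars.splitOn first ['=']                    -- .split('=')
  let part1 := (PySem.List.pyGet? parts 1).getD []                -- first_data_line[1]; default unreachable under Pre_
  pvLoopA part1 0 false false + (((PySem.List.pyGet? parts 0).getD []).length : Int)

-- ===== PORT B =====
def get_midpoint_alt (data_lines : List String) : Int :=
  let first := ((PySem.List.pyGet? data_lines 0).getD "").toList  -- data_lines[0]; default unreachable under Pre_
  let parts := PySem.Chars.splitOn first ['=']                    -- .split('=')
  let s := (PySem.List.pyGet? parts 1).getD []                    -- parts[1]; default unreachable under Pre_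
  let afterToken := s.dropWhile (· == ' ')                        -- s.lstrip(' '): exact, strip set is the single char ' '
  let sp := PySem.Chars.find afterToken [' ']                     -- after_token.find(' ')
  let mid : Int :=
    if sp ≠ -1 then
      let tail := (PySem.List.slice afterToken (some sp) none).dropWhile (· == ' ')  -- after_token[sp:].lstrip(' ')
      if tail ≠ [] then (s.length : Int) - (tail.length : Int) - 1 else 0
    else 0
  mid + (((PySem.List.pyGet? parts 0).getD []).length : Int)

-- ===== PRECONDITION & SPEC =====
-- Pre_ excludes exactly the inputs where Python A raises: empty data_lines (IndexError on
-- data_lines[0]) and a first line without '=' (IndexError on first_data_line[1]).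
def Pre_get_midpoint (data_lines : List String) : Prop :=
  data_lines ≠ [] ∧ PySem.Str.isIn "=" (data_lines.headD "") = true
instance (data_lines : List String) : Decidable (Pre_get_midpoint data_lines) := by
  unfold Pre_get_midpoint; infer_instance
def pvWitness_get_midpoint : List String := ["pl_name= Kepler-22 b  "]

def Spec_get_midpoint (data_lines : List String) (out : Int) : Prop := out = get_midpoint_alt data_lines
instance (data_lines : List String) (out : Int) : Decidable (Spec_get_midpoint data_lines out) := by
  unfold Spec_get_midpoint; infer_instance

-- ===== CLAIM (what is proved, stated in full; the proofs are below) =====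
def Claim_equal_get_midpoint : Prop := ∀ (data_lines : List String), Dom_get_midpoint data_lines → Pre_get_midpoint data_lines → Spec_get_midpoint data_lines (get_midpoint data_lines)

-- ===== LEMMAS AND PROOFS =====

-- the closed form both programs compute on s = parts[1] (proof-only helper)
def pvCF (s : List Char) : Int :=
  let t3 := ((s.dropWhile (· == ' ')).dropWhile (fun c => !(c == ' '))).dropWhile (· == ' ')
  if t3 = [] then 0 else (s.length : Int) - (t3.length : Int) - 1

theorem pv_drop_takeWhile_len {α : Type} (p : α → Bool) (l : List α) :
    l.drop (l.takeWhile p).length = l.dropWhile p := by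
  induction l with
  | nil => simp
  | cons c t ih =>
    by_cases hc : p c <;> simp [List.takeWhile_cons, List.dropWhile_cons, hc, ih]

theorem pv_len_tw_dw {α : Type} (p : α → Bool) (l : List α) :
    (l.takeWhile p).length + (l.dropWhile p).length = l.length := by
  induction l with
  | nil => simp
  | cons c t ih =>
    by_cases hc : p c <;> simp [List.takeWhile_cons, List.dropWhile_cons, hc, ih] <;> omega

-- phase 2: hit_val and hit_whitespace both set — skip spaces, stop before the next token
theorem pv_phase2 (s : List Char) (i : Int) :
    pvLoopA s i true true =
      if s.dropWhile (· == ' ') = [] then 0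
      else i + ((s.takeWhile (· == ' ')).length : Int) - 1 := by
  induction s generalizing i with
  | nil => simp [pvLoopA]
  | cons c t ih =>
    by_cases hc : c = ' '
    · rw [show pvLoopA (c :: t) i true true = pvLoopA t (i + 1) true true by
        simp [pvLoopA, hc]]
      rw [ih]
      simp only [List.dropWhile_cons, List.takeWhile_cons, hc]
      simp only [show ((' ' == ' ') = true) from rfl, if_pos trivial, List.length_cons]
      split_ifs <;> push_cast <;> omega
    · simp [pvLoopA, hc, List.dropWhile_cons, List.takeWhile_cons]

-- phase 1: hit_val set — skip the non-space token
theorem pv_phase1 (s : List Char) (i : Int) :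
    pvLoopA s i true false =
      pvLoopA (s.dropWhile (fun c => !(c == ' '))) (i + ((s.takeWhile (fun c => !(c == ' '))).length : Int)) true false := by
  induction s generalizing i with
  | nil => simp [pvLoopA]
  | cons c t ih =>
    by_cases hc : c = ' '
    · simp [pvLoopA, hc, List.dropWhile_cons, List.takeWhile_cons]
    · rw [show pvLoopA (c :: t) i true false = pvLoopA t (i + 1) true false by
        simp [pvLoopA, hc]]
      rw [ih]
      simp only [List.dropWhile_cons, List.takeWhile_cons]
      rw [if_pos (by simp [hc]), if_pos (by simp [hc])]
      congr 1
      simp only [List.length_cons]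
      push_cast; omega

-- phase 0: skip the leading spaces
theorem pv_phase0 (s : List Char) (i : Int) :
    pvLoopA s i false false =
      pvLoopA (s.dropWhile (· == ' ')) (i + ((s.takeWhile (· == ' ')).length : Int)) false false := by
  induction s generalizing i with
  | nil => simp [pvLoopA]
  | cons c t ih =>
    by_cases hc : c = ' '
    · rw [show pvLoopA (c :: t) i false false = pvLoopA t (i + 1) false false by
        simp [pvLoopA, hc]]
      rw [ih]
      simp only [List.dropWhile_cons, List.takeWhile_cons, hc]
      simp only [show ((' ' == ' ') = true) from rfl, if_pos trivial, List.length_cons]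
      congr 1
      push_cast; omega
    · simp [pvLoopA, hc, List.dropWhile_cons, List.takeWhile_cons]

-- A's loop computes the closed form
theorem pv_loopA_eq_cf (s : List Char) : pvLoopA s 0 false false = pvCF s := by
  rw [pv_phase0]
  rcases h1 : s.dropWhile (· == ' ') with _ | ⟨c, u⟩
  · simp [pvCF, h1, pvLoopA]
  · have hc : c ≠ ' ' := by
      have := List.head_dropWhile_not (· == ' ') (l := s) (by simp [h1])
      simpa [h1] using this
    rw [show pvLoopA (c :: u) (0 + ((s.takeWhile (· == ' ')).length : Int)) false false
          = pvLoopA u ((0 + ((s.takeWhile (· == ' ')).length : Int)) + 1) true false by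
        simp [pvLoopA, hc]]
    rw [pv_phase1]
    rcases h2 : u.dropWhile (fun c => !(c == ' ')) with _ | ⟨d, v⟩
    · have ht3 : ((s.dropWhile (· == ' ')).dropWhile (fun c => !(c == ' '))) = [] := by
        rw [h1, List.dropWhile_cons, if_pos (by simp [hc]), h2]
      simp [pvCF, ht3, pvLoopA]
    · have hd : d = ' ' := by
        have := List.head_dropWhile_not (fun c => !(c == ' ')) (l := u) (by simp [h2])
        simpa [h2] using this
      have hstep : ∀ j : Int, pvLoopA (d :: v) j true false = pvLoopA v (j + 1) true true := by
        intro j; simp [pvLoopA, hd]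
      rw [hstep, pv_phase2]
      have ht3 : ((s.dropWhile (· == ' ')).dropWhile (fun c => !(c == ' '))).dropWhile (· == ' ')
          = v.dropWhile (· == ' ') := by
        rw [h1, List.dropWhile_cons, if_pos (by simp [hc]), h2, List.dropWhile_cons,
          if_pos (by simp [hd])]
      unfold pvCF
      simp only [ht3]
      split_ifs with h3
      · rfl
      · have e1 := pv_len_tw_dw (· == ' ') s
        have e2 := pv_len_tw_dw (fun c => !(c == ' ')) u
        have e3 := pv_len_tw_dw (· == ' ') v
        have l1 : (s.dropWhile (· == ' ')).length = u.length + 1 := by rw [h1]; simp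
        have l2 : (u.dropWhile (fun c => !(c == ' '))).length = v.length + 1 := by rw [h2]; simp
        push_cast
        omega

theorem pv_singleton_prefix {a : Char} {l : List Char} (h : l ≠ []) (hh : l.head h = a) :
    [a] <+: l := by
  rcases l with _ | ⟨b, t⟩
  · simp at h
  · simp at hh
    exact (List.cons_prefix_cons).2 ⟨hh.symm, List.nil_prefix⟩

-- B's string-primitive arithmetic computes the same closed form
theorem pv_alt_eq_cf (s : List Char) :
    (if PySem.Chars.find (s.dropWhile (· == ' ')) [' '] ≠ -1 then
       if ((PySem.List.slice (s.dropWhile (· == ' '))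
              (some (PySem.Chars.find (s.dropWhile (· == ' ')) [' '])) none).dropWhile (· == ' ')) ≠ [] then
         (s.length : Int) - (((PySem.List.slice (s.dropWhile (· == ' '))
              (some (PySem.Chars.find (s.dropWhile (· == ' ')) [' '])) none).dropWhile (· == ' ')).length : Int) - 1
       else 0
     else 0) = pvCF s := by
  set t1 := s.dropWhile (· == ' ') with ht1
  by_cases hsp : PySem.Chars.find t1 [' '] = -1
  · -- no space after the leading spaces: A's phase-1 scan never ends either
    have hni : ¬ [' '] <:+: t1 := (PySem.Chars.find_eq_neg_one_iff t1 [' ']).1 hsp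
    have hnm : ' ' ∉ t1 := fun hm => hni ((List.singleton_infix_iff ' ' t1).2 hm)
    have hall : t1.dropWhile (fun c => !(c == ' ')) = [] := by
      rw [List.dropWhile_eq_nil_iff]
      intro x hx
      have hxe : x ≠ ' ' := fun hxe => hnm (hxe ▸ hx)
      simpa using hxe
    have hcf : pvCF s = 0 := by simp [pvCF, ← ht1, hall]
    rw [if_neg (not_not_intro hsp), hcf]
  · -- the find result is the length of the token's takeWhile
    have hinf : [' '] <:+: t1 := (PySem.Chars.find_ne_neg_one_iff t1 [' ']).1 hsp
    have hpos : 0 ≤ PySem.Chars.find t1 [' '] := (PySem.Chars.find_nonneg_iff t1 [' ']).2 hinf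
    obtain ⟨hpre, hmin⟩ := PySem.Chars.find_spec hpos
    have hmem : ' ' ∈ t1 := (List.singleton_infix_iff ' ' t1).1 hinf
    have hdw : t1.dropWhile (fun c => !(c == ' ')) ≠ [] := by
      rw [Ne, List.dropWhile_eq_nil_iff]
      intro hforall
      have := hforall ' ' hmem
      simp at this
    set k := (t1.takeWhile (fun c => !(c == ' '))).length with hk
    have hdropk : t1.drop k = t1.dropWhile (fun c => !(c == ' ')) :=
      pv_drop_takeWhile_len _ t1
    have hprek : [' '] <+: t1.drop k := by
      rw [hdropk]
      apply pv_singleton_prefix hdw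
      have := List.head_dropWhile_not (fun c => !(c == ' ')) (l := t1) hdw
      simpa using this
    have hkle : k ≤ t1.length := by
      have := pv_len_tw_dw (fun c => !(c == ' ')) t1
      omega
    have hnotk : ∀ i < k, ¬ [' '] <+: t1.drop i := by
      intro i hi hp
      have hil : i < t1.length := lt_of_lt_of_le hi hkle
      have hsp' : t1[i] = ' ' := by
        rcases hp with ⟨r, hr⟩
        rw [List.singleton_append, List.drop_eq_getElem_cons hil] at hr
        injection hr with h1 _
        exact h1.symm
      have hmemt : (t1.takeWhile (fun c => !(c == ' ')))[i]'(by omega) ∈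
          t1.takeWhile (fun c => !(c == ' ')) := List.getElem_mem (by omega)
      have hq := List.mem_takeWhile_imp hmemt
      rw [List.IsPrefix.getElem (List.takeWhile_prefix _) (by omega)] at hq
      simp at hq
      exact hq hsp'
    have hfk : PySem.Chars.find t1 [' '] = (k : Int) := by
      have h1 : (PySem.Chars.find t1 [' ']).toNat = k := by
        by_contra hne
        rcases Nat.lt_or_ge (PySem.Chars.find t1 [' ']).toNat k with hlt | hge
        · exact hnotk _ hlt hpre
        · exact hmin k (by omega) hprek
      omega
    rw [if_pos hsp, hfk, PySem.List.slice_from t1 (by positivity), Int.toNat_natCast, hdropk]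
    unfold pvCF
    rw [← ht1]
    rcases h3 : (t1.dropWhile (fun c => !(c == ' '))).dropWhile (· == ' ') with _ | _
    · simp
    · simp

-- ===== VERDICT (by name: the statement is the Claim_ definition above) =====
theorem get_midpoint_spec : Claim_equal_get_midpoint := by
  intro data_lines _ _
  unfold Spec_get_midpoint get_midpoint get_midpoint_alt
  simp only []
  rw [pv_loopA_eq_cf, ← pv_alt_eq_cf]
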